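-- pv_equiv track=rewrite | github.com/udhayprakash/Python_for_interview_preparation | code_test/problem.py | max_n_min_rotation
-- ===== SOURCE A (Python) =====
-- def max_n_min_rotation(A):
--     """
--     :type A: List[int]
--     :rtype: int
--     """
--
--     array_sum = sum(A)
--     array_count = 0
--     for _index, value in enumerate(A):
--         array_count += _index * value
--
--     result_max = result_min = array_count
--     for i in range(len(A) - 1, 0, -1):
--         array_count += array_sum - (len(A) * A[i])
--         result_max = max(array_count, result_max)
--         result_min = min(array_count, result_min)
--     return result_max, result_min
-- ===== SOURCE B (Python) =====
-- def max_n_min_rotation(A):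
--     n = len(A)
--     sums = [sum(((j + r) % n) * v for j, v in enumerate(A)) for r in range(n)]
--     return (max(sums, default=0), min(sums, default=0))
-- ===== Notes on version B (the rewrite author's own statement) =====
-- stated objective: alternative
-- what changed: B replaces A's incremental O(n) rotation-delta recurrence with a direct definition-level recomputation: for each rotation r it computes the weighted sum sum(((j+r)%n)*A[j]) from scratch and takes max/min (default 0) over all rotations.
import Mathlib
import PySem

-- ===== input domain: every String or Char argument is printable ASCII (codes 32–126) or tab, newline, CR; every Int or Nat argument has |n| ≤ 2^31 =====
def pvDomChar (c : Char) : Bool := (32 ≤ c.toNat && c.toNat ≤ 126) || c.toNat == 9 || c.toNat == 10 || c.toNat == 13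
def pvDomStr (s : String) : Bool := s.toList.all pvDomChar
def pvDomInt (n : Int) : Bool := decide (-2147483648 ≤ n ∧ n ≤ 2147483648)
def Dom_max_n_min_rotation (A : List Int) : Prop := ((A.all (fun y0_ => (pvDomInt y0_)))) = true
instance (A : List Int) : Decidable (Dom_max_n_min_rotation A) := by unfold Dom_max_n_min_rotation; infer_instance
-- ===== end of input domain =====

-- B recomputes each rotation's weighted sum from scratch instead of A's incremental delta recurrence: an alternative decomposition (B is not faster; A is O(n), B is O(n^2)).

-- ===== PORT A =====
def max_n_min_rotation (A : List Int) : Int × Int :=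
  let arraySum := A.foldl (· + ·) 0
  let arrayCount := (PySem.List.enumerate A 0).foldl (fun acc p => acc + p.1 * p.2) 0
  let st := (PySem.List.pyRange ((A.length : Int) - 1) 0 (-1)).foldl
    (fun (s : Int × Int × Int) i =>
      let c := s.1 + (arraySum - (A.length : Int) * PySem.List.pyGetD A i 0)
      (c, max c s.2.1, min c s.2.2))
    (arrayCount, arrayCount, arrayCount)
  (st.2.1, st.2.2)

-- ===== PORT B =====
def rotSumB (A : List Int) (r : Int) : Int :=
  (PySem.List.enumerate A 0).foldl
    (fun acc p => acc + (PySem.Int.mod (p.1 + r) (A.length : Int)) * p.2) 0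

def max_n_min_rotation_alt (A : List Int) : Int × Int :=
  let sums := (PySem.List.pyRange 0 (A.length : Int) 1).map (fun r => rotSumB A r)
  ((PySem.List.max? sums (fun x => x)).getD 0, (PySem.List.min? sums (fun x => x)).getD 0)

-- ===== PRECONDITION & SPEC =====
def Spec_max_n_min_rotation (A : List Int) (out : Int × Int) : Prop := out = max_n_min_rotation_alt A
instance (A : List Int) (out : Int × Int) : Decidable (Spec_max_n_min_rotation A out) := by unfold Spec_max_n_min_rotation; infer_instance

-- ===== CLAIM (what is proved, stated in full; the proofs are below) =====
def Claim_equal_max_n_min_rotation : Prop := ∀ (A : List Int), Dom_max_n_min_rotation A → Spec_max_n_min_rotation A (max_n_min_rotation A)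

-- ===== LEMMAS AND PROOFS =====

def pvF (A : List Int) (r : Int) : Int :=
  ∑ k ∈ Finset.range A.length, PySem.Int.mod ((k : Int) + r) (A.length : Int) * A.getD k 0

theorem pv_sumfold (A : List Int) : ∀ (acc : Int),
    A.foldl (· + ·) acc = acc + ∑ k ∈ Finset.range A.length, A.getD k 0 := by
  induction A with
  | nil => intro acc; simp
  | cons x t ih =>
    intro acc
    simp only [List.foldl_cons, List.length_cons]
    rw [ih (acc + x), Finset.sum_range_succ']
    simp only [List.getD_cons_succ, List.getD_cons_zero]
    ring

theorem pv_enumFold (g : Int → Int) : ∀ (A : List Int) (s acc : Int),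
    (PySem.List.enumerate A s).foldl (fun acc p => acc + g p.1 * p.2) acc
      = acc + ∑ k ∈ Finset.range A.length, g (s + (k : Int)) * A.getD k 0 := by
  intro A
  induction A with
  | nil => intro s acc; simp [PySem.List.enumerate_nil]
  | cons x t ih =>
    intro s acc
    rw [PySem.List.enumerate_cons, List.foldl_cons, ih (s + 1) (acc + g s * x)]
    simp only [List.length_cons]
    rw [Finset.sum_range_succ']
    simp only [List.getD_cons_succ, List.getD_cons_zero]
    have h1 : ∀ k : Nat, g (s + (((k : Int)) + 1)) * t.getD k 0 = g (s + 1 + (k : Int)) * t.getD k 0 := by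
      intro k; ring_nf
    push_cast
    rw [Finset.sum_congr rfl (fun k _ => h1 k)]
    ring_nf

theorem pv_mod_small (x n : Int) (h0 : 0 ≤ x) (h1 : x < n) : PySem.Int.mod x n = x := by
  rw [PySem.Int.mod_eq_emod_of_pos (by omega)]
  exact Int.emod_eq_of_lt h0 h1

theorem pv_F_zero (A : List Int) :
    pvF A 0 = ∑ k ∈ Finset.range A.length, (k : Int) * A.getD k 0 := by
  unfold pvF
  refine Finset.sum_congr rfl (fun k hk => ?_)
  rw [Finset.mem_range] at hk
  rw [add_zero, pv_mod_small _ _ (by positivity) (by exact_mod_cast hk)]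

theorem pv_mod_step (n k m : Nat) (hk : k < n) (hm : m + 1 < n) :
    PySem.Int.mod ((k : Int) + ((m : Int) + 1)) (n : Int)
      = if k = n - 1 - m then PySem.Int.mod ((k : Int) + (m : Int)) (n : Int) + 1 - (n : Int)
        else PySem.Int.mod ((k : Int) + (m : Int)) (n : Int) + 1 := by
  by_cases hkk : k = n - 1 - m
  · rw [if_pos hkk]
    have hx : (k : Int) + (m : Int) = (n : Int) - 1 := by omega
    have hx1 : (k : Int) + ((m : Int) + 1) = (n : Int) := by omega
    have e1 : PySem.Int.mod ((k : Int) + ((m : Int) + 1)) (n : Int) = 0 := by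
      rw [hx1, PySem.Int.mod_eq_emod_of_pos (by omega), Int.emod_self]
    have e2 : PySem.Int.mod ((k : Int) + (m : Int)) (n : Int) = (n : Int) - 1 := by
      rw [hx]; exact pv_mod_small _ _ (by omega) (by omega)
    rw [e1, e2]; ring
  · rw [if_neg hkk]
    by_cases hlt : k + m < n
    · have e1 : PySem.Int.mod ((k : Int) + ((m : Int) + 1)) (n : Int) = (k : Int) + ((m : Int) + 1) :=
        pv_mod_small _ _ (by positivity) (by omega)
      have e2 : PySem.Int.mod ((k : Int) + (m : Int)) (n : Int) = (k : Int) + (m : Int) :=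
        pv_mod_small _ _ (by positivity) (by omega)
      rw [e1, e2]; ring
    · have e1 : PySem.Int.mod ((k : Int) + (m : Int)) (n : Int) = (k : Int) + (m : Int) - (n : Int) := by
        rw [PySem.Int.mod_eq_emod_of_pos (by omega), ← Int.sub_emod_right,
            Int.emod_eq_of_lt (by omega) (by omega)]
      have e2 : PySem.Int.mod ((k : Int) + ((m : Int) + 1)) (n : Int)
          = (k : Int) + (m : Int) + 1 - (n : Int) := by
        rw [PySem.Int.mod_eq_emod_of_pos (by omega), ← Int.sub_emod_right,
            Int.emod_eq_of_lt (by omega) (by omega)]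
        ring
      rw [e1, e2]; ring

theorem pv_F_succ (A : List Int) (m : Nat) (hm : m + 1 < A.length) :
    pvF A ((m : Int) + 1)
      = pvF A (m : Int) + (∑ k ∈ Finset.range A.length, A.getD k 0)
        - (A.length : Int) * A.getD (A.length - 1 - m) 0 := by
  have h1 : pvF A ((m : Int) + 1)
      = ∑ k ∈ Finset.range A.length,
          ((PySem.Int.mod ((k : Int) + (m : Int)) (A.length : Int) * A.getD k 0 + A.getD k 0)
            - (if k = A.length - 1 - m then (A.length : Int) * A.getD k 0 else 0)) := by
    unfold pvF
    refine Finset.sum_congr rfl (fun k hk => ?_)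
    rw [Finset.mem_range] at hk
    rw [pv_mod_step A.length k m hk hm]
    by_cases h : k = A.length - 1 - m <;> simp [h] <;> ring
  rw [h1, Finset.sum_sub_distrib, Finset.sum_add_distrib,
      Finset.sum_ite_eq' (Finset.range A.length) (A.length - 1 - m)
        (fun k => (A.length : Int) * A.getD k 0),
      if_pos (Finset.mem_range.mpr (by omega))]
  unfold pvF
  ring

def pvLoop (A : List Int) : Nat → Int × Int × Int
  | 0 => (pvF A 0, pvF A 0, pvF A 0)
  | m + 1 =>
    let prev := pvLoop A m
    let c := pvF A ((m : Int) + 1)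
    (c, max c prev.2.1, min c prev.2.2)

theorem pv_loop_fst (A : List Int) (m : Nat) : (pvLoop A m).1 = pvF A (m : Int) := by
  cases m with
  | zero => simp [pvLoop]
  | succ u => simp [pvLoop]

theorem pv_loopA (A : List Int) (m : Nat) (hm : m ≤ A.length - 1) :
    ((List.range m).map (fun (k : Nat) => ((A.length : Int) - 1) - (k : Int))).foldl
      (fun (s : Int × Int × Int) i =>
        let c := s.1 + ((A.foldl (· + ·) 0) - (A.length : Int) * PySem.List.pyGetD A i 0)
        (c, max c s.2.1, min c s.2.2))
      (pvF A 0, pvF A 0, pvF A 0) = pvLoop A m := by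
  induction m with
  | zero => simp [pvLoop]
  | succ t ih =>
    have ht : t ≤ A.length - 1 := by omega
    rw [List.range_succ, List.map_append, List.foldl_append, ih ht]
    have hidx : ((A.length : Int) - 1) - (t : Int) = ((A.length - 1 - t : Nat) : Int) := by
      omega
    simp only [List.map_cons, List.map_nil, List.foldl_cons, List.foldl_nil]
    rw [hidx, PySem.List.pyGetD_natCast, pv_sumfold A 0, pv_loop_fst]
    have hstep : pvF A (t : Int) + ((0 + ∑ k ∈ Finset.range A.length, A.getD k 0)
        - (A.length : Int) * A.getD (A.length - 1 - t) 0) = pvF A ((t : Int) + 1) := by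
      rw [pv_F_succ A t (by omega)]; ring
    rw [hstep]
    simp [pvLoop]

theorem pv_rotSum_eq (A : List Int) (r : Int) : rotSumB A r = pvF A r := by
  unfold rotSumB pvF
  rw [pv_enumFold (fun j => PySem.Int.mod (j + r) (A.length : Int)) A 0 0]
  simp

theorem pv_sumsB (A : List Int) :
    (PySem.List.pyRange 0 (A.length : Int) 1).map (fun r => rotSumB A r)
      = (List.range A.length).map (fun (m : Nat) => pvF A (m : Int)) := by
  rw [PySem.List.pyRange_one]
  simp [List.map_map, Function.comp, pv_rotSum_eq]

theorem pv_foldmax (A : List Int) (m : Nat) :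
    ((List.range m).map (fun (k : Nat) => pvF A ((k : Int) + 1))).foldl max (pvF A 0)
      = (pvLoop A m).2.1 := by
  induction m with
  | zero => simp [pvLoop]
  | succ t ih =>
    rw [List.range_succ, List.map_append, List.foldl_append, ih]
    simp only [List.map_cons, List.map_nil, List.foldl_cons, List.foldl_nil, pvLoop]
    rw [max_comm]

theorem pv_foldmin (A : List Int) (m : Nat) :
    ((List.range m).map (fun (k : Nat) => pvF A ((k : Int) + 1))).foldl min (pvF A 0)
      = (pvLoop A m).2.2 := by
  induction m with
  | zero => simp [pvLoop]
  | succ t ih =>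
    rw [List.range_succ, List.map_append, List.foldl_append, ih]
    simp only [List.map_cons, List.map_nil, List.foldl_cons, List.foldl_nil, pvLoop]
    rw [min_comm]

theorem pv_main (A : List Int) : max_n_min_rotation A = max_n_min_rotation_alt A := by
  cases A with
  | nil => rfl
  | cons x t =>
    set A := x :: t with hAdef
    have hn : A.length = t.length + 1 := by simp [hAdef]
    have hsums : (PySem.List.pyRange 0 (A.length : Int) 1).map (fun r => rotSumB A r)
        = pvF A 0 :: (List.range t.length).map (fun (k : Nat) => pvF A ((k : Int) + 1)) := by
      rw [pv_sumsB, hn, List.range_succ_eq_map]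
      simp only [List.map_cons, Nat.cast_zero, List.map_map]
      congr 1
    have hB : max_n_min_rotation_alt A
        = (((List.range t.length).map (fun (k : Nat) => pvF A ((k : Int) + 1))).foldl max (pvF A 0),
           ((List.range t.length).map (fun (k : Nat) => pvF A ((k : Int) + 1))).foldl min (pvF A 0)) := by
      show ((PySem.List.max? ((PySem.List.pyRange 0 (A.length : Int) 1).map (fun r => rotSumB A r)) (fun x => x)).getD 0,
            (PySem.List.min? ((PySem.List.pyRange 0 (A.length : Int) 1).map (fun r => rotSumB A r)) (fun x => x)).getD 0) = _
      rw [hsums, PySem.List.max?_id_cons, PySem.List.min?_id_cons]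
      rfl
    have harrayCount : (PySem.List.enumerate A 0).foldl (fun acc p => acc + p.1 * p.2) 0 = pvF A 0 := by
      have h := pv_enumFold (fun j => j) A 0 0
      simp only [zero_add] at h
      rw [show (fun (acc : Int) (p : Int × Int) => acc + p.1 * p.2)
            = (fun (acc : Int) (p : Int × Int) => acc + (fun j => j) p.1 * p.2) from rfl, h,
          pv_F_zero]
    have hrange : PySem.List.pyRange ((A.length : Int) - 1) 0 (-1)
        = (List.range t.length).map (fun (k : Nat) => ((A.length : Int) - 1) - (k : Int)) := by
      rw [PySem.List.pyRange_neg_one]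
      have h2 : ((A.length : Int) - 1 - 0).toNat = t.length := by rw [hn]; push_cast; omega
      rw [h2]
    have hA : max_n_min_rotation A = ((pvLoop A t.length).2.1, (pvLoop A t.length).2.2) := by
      show (let st := (PySem.List.pyRange ((A.length : Int) - 1) 0 (-1)).foldl
              (fun (s : Int × Int × Int) i =>
                let c := s.1 + ((A.foldl (· + ·) 0) - (A.length : Int) * PySem.List.pyGetD A i 0)
                (c, max c s.2.1, min c s.2.2))
              ((PySem.List.enumerate A 0).foldl (fun acc p => acc + p.1 * p.2) 0,
               (PySem.List.enumerate A 0).foldl (fun acc p => acc + p.1 * p.2) 0,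
               (PySem.List.enumerate A 0).foldl (fun acc p => acc + p.1 * p.2) 0)
            (st.2.1, st.2.2)) = _
      simp only [harrayCount]
      rw [hrange, pv_loopA A t.length (by omega)]
    rw [hA, hB, pv_foldmax, pv_foldmin]

-- ===== VERDICT (by name: the statement is the Claim_ definition above) =====
theorem max_n_min_rotation_spec : Claim_equal_max_n_min_rotation := by
  intro A _
  unfold Spec_max_n_min_rotation
  exact pv_main A
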